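-- pv_equiv track=rewrite | github.com/yuanfang1684543/telegram-channel-sync | main.py | wiz_progress
-- ===== SOURCE A (Python) =====
-- WIZ_STEPS = {
--     "admin":   "第1步 设置管理员",
--     "source":  "第2步 设置源频道",
--     "target":  "第3步 设置目标频道",
--     "confirm": "第4步 确认完成",
-- }
--
-- def wiz_progress(cur: str) -> str:
--     keys = list(WIZ_STEPS.keys())
--     past = True
--     out = []
--     for k in keys:
--         if k == cur:
--             past = False
--             out.append(f"🔵 {WIZ_STEPS[k]}")
--         elif past:
--             out.append(f"✅ {WIZ_STEPS[k]}")
--         else: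
--             out.append(f"⚪ {WIZ_STEPS[k]}")
--     return "\n".join(out)
-- ===== SOURCE B (Python) =====
-- WIZ_STEPS = {
--     "admin":   "第1步 设置管理员",
--     "source":  "第2步 设置源频道",
--     "target":  "第3步 设置目标频道",
--     "confirm": "第4步 确认完成",
-- }
--
-- def _build_table():
--     keys = list(WIZ_STEPS.keys())
--     n = len(keys)
--
--     def render(pos):
--         marks = ["✅"] * pos
--         if pos < n:
--             marks.append("🔵")
--             marks.extend(["⚪"] * (n - pos - 1))
--         return "\n".join(f"{m} {WIZ_STEPS[k]}" for m, k in zip(marks, keys))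
--
--     return {k: render(i) for i, k in enumerate(keys)}, render(n)
--
-- _WIZ_TABLE, _WIZ_ALL_DONE = _build_table()
--
-- def wiz_progress(cur: str) -> str:
--     return _WIZ_TABLE.get(cur, _WIZ_ALL_DONE)
-- ===== Notes on version B (the rewrite author's own statement) =====
-- stated objective: faster
-- what changed: B precomputes, once at module load, the rendered progress string for every possible current step (plus the all-done default) into a dict; the function itself is a single O(1) table lookup instead of A's per-call scan with a running flag.
import Mathlib
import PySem

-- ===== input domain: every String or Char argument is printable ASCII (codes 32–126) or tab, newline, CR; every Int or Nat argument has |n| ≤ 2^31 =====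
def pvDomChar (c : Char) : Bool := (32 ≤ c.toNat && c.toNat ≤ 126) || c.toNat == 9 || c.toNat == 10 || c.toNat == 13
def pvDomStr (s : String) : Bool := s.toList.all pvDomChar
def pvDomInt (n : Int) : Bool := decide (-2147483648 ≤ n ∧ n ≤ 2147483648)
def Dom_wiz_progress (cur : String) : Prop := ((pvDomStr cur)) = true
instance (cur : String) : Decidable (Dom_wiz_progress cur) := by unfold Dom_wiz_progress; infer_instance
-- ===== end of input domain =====

-- B precomputes all possible rendered progress strings into a table once; each call is a plain lookup.

-- module constant WIZ_STEPS
def wizSteps : PySem.Dict String String := PySem.Dict.mk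
  [("admin", "第1步 设置管理员"),
   ("source", "第2步 设置源频道"),
   ("target", "第3步 设置目标频道"),
   ("confirm", "第4步 确认完成")]

-- ===== PORT A =====
-- WIZ_STEPS[k] with k drawn from WIZ_STEPS.keys always hits; getD "" is exact here.
def wiz_progress (cur : String) : String :=
  let keys := wizSteps.keys
  let st := keys.foldl (fun (st : Bool × List String) k =>
    if k == cur then (false, st.2 ++ ["🔵 " ++ PySem.Dict.getD wizSteps k ""])
    else if st.1 then (st.1, st.2 ++ ["✅ " ++ PySem.Dict.getD wizSteps k ""])
    else (st.1, st.2 ++ ["⚪ " ++ PySem.Dict.getD wizSteps k ""])) (true, [])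
  PySem.Str.join "\n" st.2

-- ===== PORT B =====
-- render(pos): the marks list built by replicate/append, zipped with the keys.
def wizRender (pos : Nat) : String :=
  let keys := wizSteps.keys
  let n := keys.length
  let marks := List.replicate pos "✅" ++
    (if pos < n then ["🔵"] ++ List.replicate (n - pos - 1) "⚪" else [])
  PySem.Str.join "\n" ((marks.zip keys).map (fun mk => mk.1 ++ " " ++ PySem.Dict.getD wizSteps mk.2 ""))

-- _WIZ_TABLE / _WIZ_ALL_DONE, precomputed once from WIZ_STEPS
def wizTable : PySem.Dict String String :=
  PySem.Dict.mk ((PySem.List.enumerate wizSteps.keys).map (fun ik => (ik.2, wizRender ik.1.toNat)))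

def wizAllDone : String := wizRender wizSteps.keys.length

def wiz_progress_alt (cur : String) : String :=
  PySem.Dict.getD wizTable cur wizAllDone

-- ===== PRECONDITION & SPEC =====
def Spec_wiz_progress (cur : String) (out : String) : Prop := out = wiz_progress_alt cur
instance (cur : String) (out : String) : Decidable (Spec_wiz_progress cur out) := by unfold Spec_wiz_progress; infer_instance

-- ===== CLAIM =====
def Claim_equal_wiz_progress : Prop := ∀ (cur : String), Dom_wiz_progress cur → Spec_wiz_progress cur (wiz_progress cur)

-- ===== LEMMAS AND PROOFS =====
theorem wiz_progress_other (cur : String) (h1 : cur ≠ "admin") (h2 : cur ≠ "source")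
    (h3 : cur ≠ "target") (h4 : cur ≠ "confirm") :
    wiz_progress cur = wiz_progress_alt cur := by
  simp [wiz_progress, wiz_progress_alt, wizTable, wizAllDone, wizRender, wizSteps,
    PySem.Dict.keys_mk, PySem.Dict.getD, PySem.Dict.get?_mk_cons, PySem.Dict.get?, PySem.List.enumerate,
    Ne.symm h1, Ne.symm h2, Ne.symm h3, Ne.symm h4]

-- ===== VERDICT =====
theorem wiz_progress_spec : Claim_equal_wiz_progress := by
  intro cur _
  unfold Spec_wiz_progress
  by_cases h1 : cur = "admin"
  · subst h1; decide
  by_cases h2 : cur = "source"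
  · subst h2; decide
  by_cases h3 : cur = "target"
  · subst h3; decide
  by_cases h4 : cur = "confirm"
  · subst h4; decide
  exact wiz_progress_other cur h1 h2 h3 h4
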